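-- pv_equiv track=rewrite | github.com/ducphanduyagentp/CSCI-141 | Homework4/test_debug1.py | nextTwoDigits
-- ===== SOURCE A (Python) =====
-- def nextTwoDigits(pairsRemaining, x):
--     """
--     Grabs the next two highest order digits that
--     haven't yet been processed.
--     :param pairsRemaining: how many pairs of digits have not yet
--     been processed
--     :param x: original number
--     :return: the two digits as a two-digit number
--     """
--
--     # skip over low order pairs of digits
--     pairsToSkip = pairsRemaining - 1
--     a = 1
--     while pairsToSkip > 0:
--         x = x // 100  # dividing by 100 removes a low-order pair of digits
--         a = a * 100
--         pairsToSkip -= 1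
--
--     # Bug fixed: after remove the low-order pairs of digits, we still need to extract
--     # the necessary pair of digits
--     x = x % 100
--
--     # grab and return the next pair as 2-digit number
--     return x
-- ===== SOURCE B (Python) =====
-- def nextTwoDigits(pairsRemaining, x):
--     shift = pairsRemaining - 1
--     if shift > 0:
--         return (x // 100 ** shift) % 100
--     return x % 100
-- ===== Notes on version B (the rewrite author's own statement) =====
-- stated objective: simpler
-- what changed: Replaces the loop stripping one low-order pair per iteration with a single closed-form division by 100**(pairsRemaining-1) followed by % 100.
import Mathlib
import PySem

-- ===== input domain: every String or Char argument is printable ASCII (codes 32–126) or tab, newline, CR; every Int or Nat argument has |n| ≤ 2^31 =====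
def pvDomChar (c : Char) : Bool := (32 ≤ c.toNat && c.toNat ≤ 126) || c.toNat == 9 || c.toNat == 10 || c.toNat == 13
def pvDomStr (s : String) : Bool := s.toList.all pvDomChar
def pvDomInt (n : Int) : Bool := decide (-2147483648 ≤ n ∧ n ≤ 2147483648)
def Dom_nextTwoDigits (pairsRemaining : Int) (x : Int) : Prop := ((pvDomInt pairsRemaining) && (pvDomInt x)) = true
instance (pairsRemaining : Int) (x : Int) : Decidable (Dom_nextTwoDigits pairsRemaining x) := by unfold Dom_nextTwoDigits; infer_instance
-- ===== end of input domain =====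

-- B replaces A's pair-stripping loop by a single closed-form division (simpler, O(1) divisions).

-- ===== PORT A =====
-- the while loop: state (x, a), runs (pairsRemaining-1).toNat times (while pairsToSkip > 0)
def nextTwoDigitsLoop : Nat → Int × Int → Int × Int
  | 0, s => s
  | n + 1, (x, a) => nextTwoDigitsLoop n (PySem.Int.floordiv x 100, a * 100)

def nextTwoDigits (pairsRemaining : Int) (x : Int) : Int :=
  let pairsToSkip := pairsRemaining - 1
  let s := nextTwoDigitsLoop pairsToSkip.toNat (x, 1)
  PySem.Int.mod s.1 100

-- ===== PORT B =====
def nextTwoDigits_alt (pairsRemaining : Int) (x : Int) : Int :=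
  let shift := pairsRemaining - 1
  if shift > 0 then PySem.Int.mod (PySem.Int.floordiv x (100 ^ shift.toNat)) 100
  else PySem.Int.mod x 100

-- ===== PRECONDITION & SPEC =====
def Spec_nextTwoDigits (pairsRemaining : Int) (x : Int) (out : Int) : Prop := out = nextTwoDigits_alt pairsRemaining x
instance (pairsRemaining : Int) (x : Int) (out : Int) : Decidable (Spec_nextTwoDigits pairsRemaining x out) := by unfold Spec_nextTwoDigits; infer_instance

-- ===== CLAIM (what is proved, stated in full; the proofs are below) =====
def Claim_equal_nextTwoDigits : Prop := ∀ (pairsRemaining : Int) (x : Int), Dom_nextTwoDigits pairsRemaining x → Spec_nextTwoDigits pairsRemaining x (nextTwoDigits pairsRemaining x)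

-- ===== LEMMAS AND PROOFS =====

theorem nextTwoDigitsLoop_fst (n : Nat) : ∀ x a : Int,
    (nextTwoDigitsLoop n (x, a)).1 = PySem.Int.floordiv x (100 ^ n) := by
  induction n with
  | zero =>
    intro x a
    show x = PySem.Int.floordiv x (100 ^ 0)
    rw [pow_zero, PySem.Int.floordiv_eq_ediv_of_pos one_pos, Int.ediv_one]
  | succ n ih =>
    intro x a
    have h100 : (0:Int) < 100 := by norm_num
    have hpow : (0:Int) < 100 ^ n := by positivity
    have hpow1 : (0:Int) < 100 ^ (n + 1) := by positivity
    rw [nextTwoDigitsLoop, ih,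
      PySem.Int.floordiv_eq_ediv_of_pos h100,
      PySem.Int.floordiv_eq_ediv_of_pos hpow,
      PySem.Int.floordiv_eq_ediv_of_pos hpow1,
      Int.ediv_ediv_of_nonneg (le_of_lt h100), pow_succ, mul_comm (100 ^ n) 100]

-- ===== VERDICT (by name: the statement is the Claim_ definition above) =====
theorem nextTwoDigits_spec : Claim_equal_nextTwoDigits := by
  intro p x _
  unfold Spec_nextTwoDigits nextTwoDigits nextTwoDigits_alt
  simp only [nextTwoDigitsLoop_fst]
  by_cases h : p - 1 > 0
  · rw [if_pos h]
  · rw [if_neg h]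
    have h0 : (p - 1).toNat = 0 := by omega
    rw [h0, pow_zero, PySem.Int.floordiv_eq_ediv_of_pos one_pos, Int.ediv_one]
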